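-- pv_equiv track=rewrite | github.com/wusatosi/tt-metal | scripts/apc_stats_script.py | group_tests_by_base_name
-- ===== SOURCE A (Python) =====
-- def group_tests_by_base_name(test_times):
--     grouped_test_times = {}
--
--     for test_file, time in test_times.items():
--         base_name = test_file.split("/")[-1].replace(".py", "")
--
--         if base_name in grouped_test_times:
--             grouped_test_times[base_name] += time
--         else:
--             grouped_test_times[base_name] = time
--
--     filtered_grouped_test_times = {k: v for k, v in grouped_test_times.items() if v > 0}
--     return filtered_grouped_test_times
-- ===== SOURCE B (Python) =====
-- def group_tests_by_base_name(test_times):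
--     # Two-phase: project each entry to its base name, dedupe the base names
--     # in first-occurrence order, then sum each group with one scan and keep
--     # positive totals.
--     pairs = [(f.split("/")[-1].replace(".py", ""), t) for f, t in test_times.items()]
--     result = {}
--     for k in dict.fromkeys(key for key, _ in pairs):
--         s = sum(t for key, t in pairs if key == k)
--         if s > 0:
--             result[k] = s
--     return result
-- ===== Notes on version B (the rewrite author's own statement) =====
-- stated objective: alternative
-- what changed: Replaces A's single hash-accumulation pass with a two-phase traversal: project all entries to (base_name, time) pairs, dedupe the base names in first-occurrence order, then compute each group's total with a per-key scan, keeping positive totals.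
import Mathlib
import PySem

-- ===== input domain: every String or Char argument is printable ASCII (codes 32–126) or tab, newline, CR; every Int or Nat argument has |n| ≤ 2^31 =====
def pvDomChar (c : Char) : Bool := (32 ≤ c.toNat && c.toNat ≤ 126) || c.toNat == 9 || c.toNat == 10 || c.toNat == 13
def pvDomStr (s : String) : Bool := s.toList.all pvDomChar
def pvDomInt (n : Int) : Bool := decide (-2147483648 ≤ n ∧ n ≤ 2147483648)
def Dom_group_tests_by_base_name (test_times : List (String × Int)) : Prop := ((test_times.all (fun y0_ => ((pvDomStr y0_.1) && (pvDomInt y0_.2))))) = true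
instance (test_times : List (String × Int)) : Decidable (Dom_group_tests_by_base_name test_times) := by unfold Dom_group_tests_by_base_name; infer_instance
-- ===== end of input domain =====

-- B replaces A's single hash-accumulation pass by a project/dedupe/per-key-sum
-- traversal (alternative decomposition, same results).


-- shared helper: test_file.split("/")[-1].replace(".py", "")
-- (split with nonempty sep never returns [], so getLastD "" is exactly [-1])
def pvBaseName (f : String) : String :=
  PySem.Str.replace (((PySem.Str.split? f "/").getD []).getLastD "") ".py" ""

-- ===== PORT A =====
-- grouped[base] = grouped.get(base, 0) + time (the if/in-else pair) is Dict.modify;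
-- the final dict comprehension is a filter over the items.
def group_tests_by_base_name (test_times : List (String × Int)) : List (String × Int) :=
  let grouped := test_times.foldl
    (fun d p => d.modify (pvBaseName p.1) 0 (fun v => v + p.2)) PySem.Dict.empty
  grouped.items.filter (fun kv => decide (kv.2 > 0))

-- ===== PORT B =====
def group_tests_by_base_name_alt (test_times : List (String × Int)) : List (String × Int) :=
  let pairs := test_times.map (fun p => (pvBaseName p.1, p.2))
  (PySem.List.dedup (pairs.map (·.1))).foldl
    (fun acc k =>
      let s := ((pairs.filter (fun q => q.1 == k)).map (·.2)).sum
      if s > 0 then acc ++ [(k, s)] else acc) []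

-- ===== PRECONDITION & SPEC =====
def Spec_group_tests_by_base_name (test_times : List (String × Int)) (out : List (String × Int)) : Prop := out = group_tests_by_base_name_alt test_times
instance (test_times : List (String × Int)) (out : List (String × Int)) : Decidable (Spec_group_tests_by_base_name test_times out) := by unfold Spec_group_tests_by_base_name; infer_instance

-- ===== CLAIM (what is proved, stated in full; the proofs are below) =====
def Claim_equal_group_tests_by_base_name : Prop := ∀ (test_times : List (String × Int)), Dom_group_tests_by_base_name test_times → Spec_group_tests_by_base_name test_times (group_tests_by_base_name test_times)

-- ===== LEMMAS AND PROOFS =====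

-- value of A's accumulation dict at any key: summed times of the matching entries
theorem getD_foldl_modify_add (l : List (String × Int)) (d : PySem.Dict String Int) (c : String) :
    (l.foldl (fun d p => d.modify (pvBaseName p.1) 0 (fun v => v + p.2)) d).getD c 0
      = d.getD c 0 + ((l.filter (fun p => pvBaseName p.1 == c)).map (·.2)).sum := by
  induction l generalizing d with
  | nil => simp
  | cons p l ih =>
    simp only [List.foldl_cons, ih, PySem.Dict.getD_modify, List.filter_cons]
    by_cases h : pvBaseName p.1 = c
    · simp [h]; ring
    · simp [h, Ne.symm h]

theorem group_tests_by_base_name_eq (test_times : List (String × Int)) :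
    group_tests_by_base_name test_times = group_tests_by_base_name_alt test_times := by
  unfold group_tests_by_base_name group_tests_by_base_name_alt
  dsimp only
  have hnd : (test_times.foldl
      (fun d p => d.modify (pvBaseName p.1) 0 (fun v => v + p.2)) PySem.Dict.empty).keys.Nodup :=
    PySem.Dict.nodup_keys_foldl_modify_key _ _ _ _ _ PySem.Dict.nodup_keys_empty
  rw [PySem.List.foldl_append_ite
        (fun k => (0 < ((( (test_times.map (fun p => (pvBaseName p.1, p.2))).filter
            (fun q => q.1 == k)).map (·.2)).sum : Int)))
        (fun k => (k, ((((test_times.map (fun p => (pvBaseName p.1, p.2))).filter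
            (fun q => q.1 == k)).map (·.2)).sum : Int)))]
  rw [PySem.Dict.items_eq_map_keys _ hnd 0, PySem.Dict.keys_foldl_modify_key]
  simp only [PySem.Dict.keys_empty, PySem.Set.update_nil_left, List.filter_map,
    List.map_map, PySem.List.dedup_eq_ofList, List.nil_append, Function.comp_def,
    getD_foldl_modify_add, PySem.Dict.getD_empty, zero_add, gt_iff_lt]

-- ===== VERDICT (by name: the statement is the Claim_ definition above) =====
theorem group_tests_by_base_name_spec : Claim_equal_group_tests_by_base_name := by
  intro t _
  exact group_tests_by_base_name_eq t
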